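-- pv_equiv track=rewrite | github.com/slackman-cn/TuringComplete | Python/test_gray_code.py | num_to_glist
-- ===== SOURCE A (Python) =====
-- def num_to_glist(num, length):
--     blist = [0] * length
--     for i in range(length):
--         if num & (2**i) > 0:
--             blist[length-1-i] = 1
--     blist_rightshift = [0] + blist[:-1]
--     # XOR
--     glist = [ blist[i] ^ blist_rightshift[i] for i in range(length)]
--     return glist
-- ===== SOURCE B (Python) =====
-- def num_to_glist(num, length):
--     if length <= 0:
--         return []
--     b = num % (2 ** length)   # truncate to the low `length` bits (two's complement for negatives)
--     out = []
--     for _ in range(length):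
--         out.append((b + b // 2) % 2)   # Gray bit: lowest bit of b XOR next bit
--         b //= 2
--     out.reverse()
--     return out
-- ===== Notes on version B (the rewrite author's own statement) =====
-- stated objective: faster
-- what changed: Replaces the three intermediate bit lists (binary list, shifted copy, elementwise XOR comprehension) by a single running integer: mask num once with % 2**length, then peel each Gray bit off the low end with divmod, appending and reversing once.
import Mathlib
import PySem

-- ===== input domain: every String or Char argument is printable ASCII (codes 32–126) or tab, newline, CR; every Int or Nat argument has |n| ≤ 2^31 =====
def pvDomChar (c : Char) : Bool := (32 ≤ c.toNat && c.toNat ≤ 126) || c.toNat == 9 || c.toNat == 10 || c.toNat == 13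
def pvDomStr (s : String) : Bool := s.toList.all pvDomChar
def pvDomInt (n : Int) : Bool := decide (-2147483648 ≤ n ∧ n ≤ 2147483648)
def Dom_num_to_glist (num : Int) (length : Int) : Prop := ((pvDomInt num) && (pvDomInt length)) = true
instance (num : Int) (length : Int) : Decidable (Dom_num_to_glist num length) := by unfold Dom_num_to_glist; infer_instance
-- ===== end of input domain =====

-- B replaces A's three intermediate bit lists (binary list, shifted copy, XOR comprehension)
-- by one running masked integer whose Gray bits are peeled off low-to-high and reversed once.

-- ===== PORT A =====
def num_to_glist (num : Int) (length : Int) : List Int :=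
  let blist := (PySem.List.pyRange 0 length 1).foldl
    (fun bl i =>
      -- `2**i`: every i produced by range(length) is ≥ 0, so `(2:Int) ^ i.toNat` is exact
      if PySem.Int.band num ((2:Int) ^ i.toNat) > 0 then
        -- `blist[length-1-i] = 1`: the index is always in range, pySetD is the exact total form
        PySem.List.pySetD bl (length - 1 - i) 1
      else bl)
    (List.replicate length.toNat 0)   -- `[0] * length` ([] for length ≤ 0, as in Python)
  let blist_rightshift := 0 :: PySem.List.slice blist none (some (-1))   -- [0] + blist[:-1]
  (PySem.List.pyRange 0 length 1).map
    (fun i => PySem.Int.bxor (PySem.List.pyGetD blist i 0) (PySem.List.pyGetD blist_rightshift i 0))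
    -- blist[i] / blist_rightshift[i]: i ∈ range(length) is always in range, pyGetD is exact here

-- ===== PORT B =====
def num_to_glist_alt (num : Int) (length : Int) : List Int :=
  if length ≤ 0 then []
  else
    let st := (List.range length.toNat).foldl   -- for _ in range(length); length > 0 here
      (fun (st : Int × List Int) _ =>
        (PySem.Int.floordiv st.1 2,
         st.2 ++ [PySem.Int.mod (st.1 + PySem.Int.floordiv st.1 2) 2]))
      (PySem.Int.mod num ((2:Int) ^ length.toNat), ([] : List Int))   -- b = num % 2**length
    st.2.reverse

-- ===== PRECONDITION & SPEC =====
def Spec_num_to_glist (num : Int) (length : Int) (out : List Int) : Prop := out = num_to_glist_alt num length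
instance (num : Int) (length : Int) (out : List Int) : Decidable (Spec_num_to_glist num length out) := by unfold Spec_num_to_glist; infer_instance

-- ===== CLAIM (what is proved, stated in full; the proofs are below) =====
def Claim_equal_num_to_glist : Prop := ∀ (num : Int) (length : Int), Dom_num_to_glist num length → Spec_num_to_glist num length (num_to_glist num length)

-- ===== LEMMAS AND PROOFS =====

def pvBit (x : Int) (j : Nat) : Int := (x / 2 ^ j) % 2

theorem pvBit_cases (x : Int) (j : Nat) : pvBit x j = 0 ∨ pvBit x j = 1 := by
  unfold pvBit; omega

theorem nat_and_two_pow (m j : Nat) : m &&& 2 ^ j = 2 ^ j * (m / 2 ^ j % 2) := by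
  rw [Nat.and_two_pow, Nat.testBit_eq_decide_div_mod_eq]
  have : m / 2 ^ j % 2 = 0 ∨ m / 2 ^ j % 2 = 1 := by omega
  rcases this with h | h <;> simp [h]

theorem neg_ediv_two_pow (M : Nat) (j : Nat) :
    ((-(M:Int) - 1) / 2 ^ j = -((M / 2 ^ j : Nat) : Int) - 1) ∧
    ((-(M:Int) - 1) % 2 ^ j = 2 ^ j - 1 - ((M % 2 ^ j : Nat) : Int)) := by
  have hb : (0:Int) < 2 ^ j := by positivity
  have hR : ((M % 2 ^ j : Nat) : Int) < 2 ^ j := by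
    exact_mod_cast Nat.mod_lt M (show 0 < 2^j by positivity)
  have hR0 : (0:Int) ≤ ((M % 2 ^ j : Nat) : Int) := by positivity
  have hM : ((M:Int)) = 2 ^ j * ((M / 2 ^ j : Nat) : Int) + ((M % 2 ^ j : Nat) : Int) := by
    exact_mod_cast (Nat.div_add_mod M (2 ^ j)).symm
  apply (Int.ediv_emod_unique hb).mpr
  refine ⟨by linear_combination hM, by omega, by omega⟩

theorem band_two_pow (a : Int) (j : Nat) :
    PySem.Int.band a ((2:Int) ^ j) = 2 ^ j * pvBit a j := by
  have hb : (0:Int) ≤ 2 ^ j := by positivity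
  have htn : ((2:Int) ^ j).toNat = 2 ^ j := by
    rw [show ((2:Int)^j) = ((2^j : Nat) : Int) by push_cast; ring, Int.toNat_natCast]
  unfold pvBit
  by_cases ha : 0 ≤ a
  · simp only [PySem.Int.band, if_pos ha, if_pos hb, htn]
    rw [nat_and_two_pow]
    have hc : a = ((a.toNat : Nat) : Int) := by omega
    rw [hc]
    push_cast
    simp
  · simp only [PySem.Int.band, if_neg ha, if_pos hb, htn]
    set M := (-a - 1).toNat with hMdef
    have haM : a = -(M:Int) - 1 := by omega
    rw [Nat.two_pow_and, Nat.testBit_eq_decide_div_mod_eq]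
    have h2 := (neg_ediv_two_pow M j).1
    rw [haM, h2]
    have : M / 2 ^ j % 2 = 0 ∨ M / 2 ^ j % 2 = 1 := by omega
    have hDcast : (-((M / 2 ^ j : Nat) : Int) - 1) % 2 = 1 - ((M / 2 ^ j % 2 : Nat) : Int) := by
      push_cast
      omega
    rcases this with h | h <;> rw [hDcast, h] <;> simp

theorem pvBit_emod (x : Int) (n j : Nat) (hj : j < n) :
    pvBit (x % 2 ^ n) j = pvBit x j := by
  unfold pvBit
  have hq : x = x % 2 ^ n + 2 ^ j * (2 ^ (n - j) * (x / 2 ^ n)) := by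
    have : (2:Int) ^ j * 2 ^ (n - j) = 2 ^ n := by
      rw [← pow_add]; congr 1; omega
    have h2 := Int.emod_add_ediv x (2 ^ n)
    linear_combination -h2 - (x / 2 ^ n) * this
  have hdiv : x / 2 ^ j = (x % 2 ^ n) / 2 ^ j + 2 ^ (n - j) * (x / 2 ^ n) := by
    conv_lhs => rw [hq]
    rw [Int.add_mul_ediv_left _ _ (by positivity : ((2:Int) ^ j) ≠ 0)]
  rw [hdiv]
  have hnj : (2:Int) ^ (n - j) = 2 * 2 ^ (n - j - 1) := by
    rw [← pow_succ']; congr 1; omega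
  rw [hnj, mul_assoc]
  omega

theorem pvBit_emod_self (x : Int) (n : Nat) : pvBit (x % 2 ^ n) n = 0 := by
  unfold pvBit
  have h1 : (0:Int) ≤ x % 2 ^ n := Int.emod_nonneg x (by positivity)
  have h2 : x % 2 ^ n < 2 ^ n := Int.emod_lt_of_pos x (by positivity)
  rw [Int.ediv_eq_zero_of_lt h1 h2]
  simp

theorem band_two_pow_pos_iff (a : Int) (j : Nat) :
    (0 < PySem.Int.band a ((2:Int) ^ j)) ↔ pvBit a j = 1 := by
  have h := band_two_pow a j
  have h2 : (0:Int) < 2 ^ j := by positivity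
  rcases pvBit_cases a j with h0 | h0 <;> rw [h, h0] <;> simp [h2]

theorem pointwise (num : Int) (n k : Nat) (hk : k < n) :
    PySem.Int.bxor
      (if 0 < PySem.Int.band num ((2:Int) ^ (n - 1 - k)) then (1:Int) else 0)
      (if k = 0 then 0
       else if 0 < PySem.Int.band num ((2:Int) ^ (n - 1 - (k-1))) then (1:Int) else 0) =
    ((num % 2 ^ n) / 2 ^ (n - 1 - k) + (num % 2 ^ n) / 2 ^ (n - k)) % 2 := by
  have e1 : ((num % 2 ^ n) / 2 ^ (n - 1 - k)) % 2 = pvBit num (n - 1 - k) := by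
    rw [show ((num % 2 ^ n) / 2 ^ (n - 1 - k)) % 2 = pvBit (num % 2 ^ n) (n - 1 - k) from rfl,
        pvBit_emod num n _ (by omega)]
  have bx00 : PySem.Int.bxor 0 0 = 0 := by decide
  have bx10 : PySem.Int.bxor 1 0 = 1 := by decide
  have bx01 : PySem.Int.bxor 0 1 = 1 := by decide
  have bx11 : PySem.Int.bxor 1 1 = 0 := by decide
  simp only [band_two_pow_pos_iff]
  by_cases hk0 : k = 0
  · subst hk0
    simp only [Nat.sub_zero] at e1 ⊢
    have e2 : ((num % 2 ^ n) / 2 ^ n) % 2 = 0 := pvBit_emod_self num n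
    rcases pvBit_cases num (n - 1) with h0 | h0 <;>
      simp [h0, bx00, bx10] <;> omega
  · have hnk : n - 1 - (k - 1) = n - k := by omega
    rw [hnk]
    have e2 : ((num % 2 ^ n) / 2 ^ (n - k)) % 2 = pvBit num (n - k) := by
      rw [show ((num % 2 ^ n) / 2 ^ (n - k)) % 2 = pvBit (num % 2 ^ n) (n - k) from rfl,
          pvBit_emod num n _ (by omega)]
    rw [if_neg hk0]
    rcases pvBit_cases num (n - 1 - k) with h0 | h0 <;>
      rcases pvBit_cases num (n - k) with h1 | h1 <;>
        simp [h0, h1, bx00, bx10, bx01, bx11] <;> omega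

theorem B_fold (s : Int) :
    ∀ (t : Nat) (acc : List Int),
      List.foldl (fun (st : Int × List Int) (_ : Nat) =>
          (PySem.Int.floordiv st.1 2,
           st.2 ++ [PySem.Int.mod (st.1 + PySem.Int.floordiv st.1 2) 2]))
        (s, acc) (List.range t) =
      (s / 2 ^ t, acc ++ (List.range t).map (fun k => (s / 2 ^ k + s / 2 ^ (k+1)) % 2)) := by
  intro t
  induction t with
  | zero => intro acc; simp
  | succ t ih =>
    intro acc
    rw [List.range_succ, List.foldl_append, ih]
    have hdd : s / 2 ^ t / 2 = s / 2 ^ (t + 1) := by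
      rw [Int.ediv_ediv_eq_ediv_mul (by positivity), pow_succ]
    simp only [List.foldl_cons, List.foldl_nil,
      PySem.Int.floordiv_eq_ediv_of_pos (by norm_num : (0:Int) < 2),
      PySem.Int.mod_eq_emod_of_pos (by norm_num : (0:Int) < 2), hdd]
    simp [List.append_assoc]

theorem reverse_map_range (n : Nat) (f : Nat → Int) :
    ((List.range n).map f).reverse = (List.range n).map (fun k => f (n - 1 - k)) := by
  apply List.ext_getElem (by simp)
  intro i h1 h2
  simp only [List.getElem_reverse, List.getElem_map, List.getElem_range, List.length_map,
    List.length_range] at *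

theorem B_char (num : Int) (length : Int) :
    num_to_glist_alt num length =
      (List.range length.toNat).map (fun k =>
        ((num % 2 ^ length.toNat) / 2 ^ (length.toNat - 1 - k)
         + (num % 2 ^ length.toNat) / 2 ^ (length.toNat - k)) % 2) := by
  unfold num_to_glist_alt
  by_cases h : length ≤ 0
  · simp [h, Int.toNat_of_nonpos h]
  · rw [if_neg h]
    rw [PySem.Int.mod_eq_emod_of_pos (by positivity)]
    rw [B_fold (num % 2 ^ length.toNat) length.toNat []]
    simp only [List.nil_append]
    rw [reverse_map_range]
    apply List.map_congr_left
    intro k hk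
    rw [List.mem_range] at hk
    have : length.toNat - 1 - k + 1 = length.toNat - k := by omega
    rw [this]

theorem getD_set_lt (l : List Int) (u j : Nat) (v : Int) (hj : j < l.length) :
    (l.set u v).getD j 0 = if u = j then v else l.getD j 0 := by
  rw [List.getD_eq_getElem _ _ (by simpa using hj), List.getElem_set]
  split
  · rfl
  · rw [List.getD_eq_getElem _ _ hj]

theorem blist_inv (num : Int) (n : Nat) (stepN : List Int → Nat → List Int)
    (hstep : ∀ bl m, m < n → stepN bl m =
      if 0 < PySem.Int.band num ((2:Int) ^ m) then bl.set (n - 1 - m) 1 else bl) :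
    ∀ (c m : Nat), m + c = n → ∀ l : List Int, l.length = n →
      (List.foldl stepN l (List.range' m c)).length = n ∧
      ∀ j, j < n →
        (List.foldl stepN l (List.range' m c)).getD j 0 =
          if j < c ∧ 0 < PySem.Int.band num ((2:Int) ^ (n - 1 - j)) then 1
          else l.getD j 0 := by
  intro c
  induction c with
  | zero =>
    intro m hmc l hl
    simp [hl]
  | succ c ih =>
    intro m hmc l hl
    rw [List.range'_succ, List.foldl_cons]
    have hmn : m < n := by omega
    have hstep' := hstep l m hmn
    have hl' : (stepN l m).length = n := by rw [hstep']; split <;> simp [hl]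
    obtain ⟨ihlen, ihget⟩ := ih (m + 1) (by omega) (stepN l m) hl'
    refine ⟨ihlen, ?_⟩
    intro j hj
    rw [ihget j hj, hstep']
    have hc : n - 1 - m = c := by omega
    by_cases hjc : j = c
    · subst hjc
      have hm' : n - 1 - j = m := by omega
      rw [hm']
      simp only [Nat.lt_irrefl, false_and, if_false, Nat.lt_succ_self, true_and]
      by_cases hcond : 0 < PySem.Int.band num ((2:Int) ^ m)
      · rw [if_pos hcond, if_pos hcond, hc, getD_set_lt l j j 1 (by omega), if_pos rfl]
      · rw [if_neg hcond, if_neg hcond]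
    · have hiff : (j < c) ↔ (j < c + 1) := by omega
      by_cases hcond : 0 < PySem.Int.band num ((2:Int) ^ m)
      · rw [if_pos hcond, hc, getD_set_lt l c j 1 (by omega), if_neg (show ¬ c = j from fun h => hjc h.symm)]
        simp [hiff]
      · rw [if_neg hcond]
        simp [hiff]



def pvStep (num : Int) (n : Nat) : List Int → Nat → List Int :=
  fun x y => if 0 < PySem.Int.band num ((2:Int) ^ y) then
    PySem.List.pySetD x ((n:Int) - 1 - (y:Int)) 1 else x

def pvBlist (num : Int) (n : Nat) : List Int :=
  List.foldl (pvStep num n) (List.replicate n 0) (List.range' 0 n)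

theorem pvBlist_spec (num : Int) (n : Nat) :
    (pvBlist num n).length = n ∧
    ∀ j, j < n → (pvBlist num n).getD j 0 =
      if 0 < PySem.Int.band num ((2:Int) ^ (n - 1 - j)) then (1:Int) else 0 := by
  obtain ⟨h1, h2⟩ := blist_inv num n (pvStep num n)
    (by
      intro bl m hm
      unfold pvStep
      by_cases hcond : 0 < PySem.Int.band num ((2:Int) ^ m)
      · rw [if_pos hcond, if_pos hcond,
          PySem.List.pySetD_of_nonneg bl 1 (by omega : (0:Int) ≤ (n : Int) - 1 - (m : Int))]
        congr 1
        omega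
      · rw [if_neg hcond, if_neg hcond])
    n 0 (by omega) (List.replicate n 0) (by simp)
  refine ⟨h1, ?_⟩
  intro j hj
  rw [pvBlist, h2 j hj]
  simp [hj]

theorem A_char (num : Int) (length : Int) :
    num_to_glist num length =
      (List.range length.toNat).map (fun k =>
        PySem.Int.bxor
          (if 0 < PySem.Int.band num ((2:Int) ^ (length.toNat - 1 - k)) then (1:Int) else 0)
          (if k = 0 then 0
           else if 0 < PySem.Int.band num ((2:Int) ^ (length.toNat - 1 - (k-1))) then (1:Int) else 0)) := by
  by_cases hlen : length ≤ 0
  · unfold num_to_glist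
    rw [PySem.List.pyRange_one_eq_nil (by omega), Int.toNat_of_nonpos hlen]
    simp
  · obtain ⟨n, hn⟩ : ∃ n : Nat, length = (n : Int) := ⟨length.toNat, by omega⟩
    subst hn
    rw [Int.toNat_natCast]
    obtain ⟨hblen, hbget⟩ := pvBlist_spec num n
    unfold num_to_glist
    rw [PySem.List.pyRange_one]
    simp only [Int.sub_zero, Int.toNat_natCast, List.foldl_map, List.map_map, zero_add]
    rw [List.range_eq_range']
    apply List.map_congr_left
    intro k hk
    have hk' : k < n := by
      have := List.mem_range'_1.mp hk
      omega
    show PySem.Int.bxor (PySem.List.pyGetD (pvBlist num n) (↑k) 0)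
        (PySem.List.pyGetD (0 :: PySem.List.slice (pvBlist num n) none (some (-1))) (↑k) 0) = _
    rw [PySem.List.slice_to_neg_one, PySem.List.pyGetD_natCast, PySem.List.pyGetD_natCast,
      hbget k hk']
    congr 1
    by_cases hk0 : k = 0
    · subst hk0
      simp
    · obtain ⟨k', rfl⟩ : ∃ k', k = k' + 1 := ⟨k - 1, by omega⟩
      simp only [List.getD_cons_succ]
      rw [if_neg hk0]
      have hdl : k' < (pvBlist num n).dropLast.length := by
        rw [List.length_dropLast, hblen]; omega
      rw [List.getD_eq_getElem _ _ hdl, List.getElem_dropLast,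
        ← List.getD_eq_getElem _ 0 (by rw [hblen]; omega : k' < (pvBlist num n).length),
        hbget k' (by omega)]
      simp


-- ===== VERDICT (by name: the statement is the Claim_ definition above) =====
theorem num_to_glist_spec : Claim_equal_num_to_glist := by
  intro num length _
  unfold Spec_num_to_glist
  rw [A_char, B_char]
  apply List.map_congr_left
  intro k hk
  rw [List.mem_range] at hk
  exact pointwise num length.toNat k hk
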